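-- pv_equiv track=rewrite | github.com/craftor-3622/Coding_test | Python/2115_honey_collection.py | maximum_price
-- ===== SOURCE A (Python) =====
-- def maximum_price(row_list: list, length: int, max_amount: int):
--     honey_set_amount = 2 ** length
--     available_list = []
--
--     # 해당 코드 블록은 조건을 만족하는 벌통 부분 집합을 추가합니다.
--     for num in range(honey_set_amount):
--         temp = []
--         for k in range(length):
--             if num & (1 << k):
--                 temp.append((row_list[k]))
--         if sum(temp) <= max_amount:
--             available_list.append(temp)
--
--     return available_list
-- ===== SOURCE B (Python) =====
-- def maximum_price(row_list: list, length: int, max_amount: int):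
--     # Incremental powerset doubling instead of bitmask enumeration;
--     # produces the same binary-counting order of subsets.
--     result = [[]]
--     for k in range(length):
--         x = row_list[k]
--         result = result + [s + [x] for s in result]
--     return [s for s in result if sum(s) <= max_amount]
-- ===== Notes on version B (the rewrite author's own statement) =====
-- stated objective: alternative
-- what changed: Replaces the bitmask double loop (for each of the 2^length masks, rescan all length bits) by incremental powerset doubling (result = result + [s+[x] for s in result]), then one filter pass.
import Mathlib
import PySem

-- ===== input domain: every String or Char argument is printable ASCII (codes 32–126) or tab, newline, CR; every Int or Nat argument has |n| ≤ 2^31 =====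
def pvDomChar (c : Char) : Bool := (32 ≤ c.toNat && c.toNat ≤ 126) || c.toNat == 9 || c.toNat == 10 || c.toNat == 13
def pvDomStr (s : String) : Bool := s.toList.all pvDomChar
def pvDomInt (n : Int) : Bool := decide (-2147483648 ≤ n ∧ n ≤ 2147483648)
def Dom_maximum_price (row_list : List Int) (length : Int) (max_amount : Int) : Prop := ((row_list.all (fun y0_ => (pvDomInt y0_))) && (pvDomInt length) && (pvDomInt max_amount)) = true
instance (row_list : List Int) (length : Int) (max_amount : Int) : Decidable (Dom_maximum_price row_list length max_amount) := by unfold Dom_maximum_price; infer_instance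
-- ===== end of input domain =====

-- B replaces A's bitmask double loop by incremental powerset doubling plus one filter pass (same subsets in the same order).

-- ===== PORT A =====
-- inner loop of A: for k in range(length): if num & (1 << k): temp.append(row_list[k])
-- (row_list[k] is ported as (pyGet? …).getD 0; Pre_ keeps every accessed index in range, so the default is never read)
def pvAInner (row_list : List Int) (L : Nat) (num : Nat) : List Int :=
  (List.range L).foldl
    (fun temp k =>
      if num &&& (1 <<< k) ≠ 0 then temp ++ [(PySem.List.pyGet? row_list (k : Int)).getD 0]
      else temp) []

def maximum_price (row_list : List Int) (length : Int) (max_amount : Int) : List (List Int) :=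
  -- honey_set_amount = 2 ** length; range over it (Pre_ requires 0 ≤ length, where the Python returns)
  (List.range (2 ^ length.toNat)).foldl
    (fun available_list num =>
      let temp := pvAInner row_list length.toNat num
      if temp.sum ≤ max_amount then available_list ++ [temp] else available_list) []

-- ===== PORT B =====
def maximum_price_alt (row_list : List Int) (length : Int) (max_amount : Int) : List (List Int) :=
  let result :=
    (List.range length.toNat).foldl
      (fun result k =>
        result ++ result.map (fun s => s ++ [(PySem.List.pyGet? row_list (k : Int)).getD 0]))
      [[]]
  result.filter (fun s => decide (s.sum ≤ max_amount))

-- ===== PRECONDITION & SPEC =====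
-- Pre_: exactly the inputs where the Python A returns: length < 0 makes range(2**length) a TypeError,
-- and length > len(row_list) makes row_list[k] an IndexError for some enumerated mask.
def Pre_maximum_price (row_list : List Int) (length : Int) (max_amount : Int) : Prop :=
  0 ≤ length ∧ length ≤ (row_list.length : Int)
instance (row_list : List Int) (length : Int) (max_amount : Int) : Decidable (Pre_maximum_price row_list length max_amount) := by unfold Pre_maximum_price; infer_instance

def pvWitness_maximum_price : List Int × Int × Int := ([1, 2, 3], 2, 3)

def Spec_maximum_price (row_list : List Int) (length : Int) (max_amount : Int) (out : List (List Int)) : Prop := out = maximum_price_alt row_list length max_amount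
instance (row_list : List Int) (length : Int) (max_amount : Int) (out : List (List Int)) : Decidable (Spec_maximum_price row_list length max_amount out) := by unfold Spec_maximum_price; infer_instance

-- ===== CLAIM (what is proved, stated in full; the proofs are below) =====
def Claim_equal_maximum_price : Prop := ∀ (row_list : List Int) (length : Int) (max_amount : Int), Dom_maximum_price row_list length max_amount → Pre_maximum_price row_list length max_amount → Spec_maximum_price row_list length max_amount (maximum_price row_list length max_amount)

-- ===== LEMMAS AND PROOFS =====

-- the element B reads at index k (same expression both ports use)
def pvX (row_list : List Int) (k : Nat) : Int := (PySem.List.pyGet? row_list (k : Int)).getD 0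

-- B's doubling loop, named for the proof
def pvSubsets (row_list : List Int) (L : Nat) : List (List Int) :=
  (List.range L).foldl
    (fun result k => result ++ result.map (fun s => s ++ [pvX row_list k])) [[]]

lemma pvAlt_eq (row_list : List Int) (length max_amount : Int) :
    maximum_price_alt row_list length max_amount
      = (pvSubsets row_list length.toNat).filter (fun s => decide (s.sum ≤ max_amount)) := rfl

lemma pvSubsets_succ (row_list : List Int) (L : Nat) :
    pvSubsets row_list (L + 1)
      = pvSubsets row_list L ++ (pvSubsets row_list L).map (fun s => s ++ [pvX row_list L]) := by
  simp [pvSubsets, List.range_succ]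

lemma pvCond_iff (num k : Nat) : (num &&& (1 <<< k) ≠ 0) ↔ num.testBit k = true := by
  rw [Nat.one_shiftLeft, Nat.and_two_pow]
  cases num.testBit k <;> simp

lemma pvAInner_succ (row_list : List Int) (L num : Nat) :
    pvAInner row_list (L + 1) num
      = if num.testBit L then pvAInner row_list L num ++ [pvX row_list L]
        else pvAInner row_list L num := by
  simp only [pvAInner, List.range_succ, List.foldl_append, List.foldl_cons, List.foldl_nil]
  by_cases h : num.testBit L
  · rw [if_pos ((pvCond_iff num L).mpr h), if_pos h]; rfl
  · rw [if_neg (fun hc => h ((pvCond_iff num L).mp hc)), if_neg h]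

lemma pvAInner_congr (row_list : List Int) (L : Nat) :
    ∀ num num', (∀ k, k < L → num.testBit k = num'.testBit k) →
      pvAInner row_list L num = pvAInner row_list L num' := by
  induction L with
  | zero => intro _ _ _; rfl
  | succ L ih =>
      intro num num' h
      rw [pvAInner_succ, pvAInner_succ, h L (Nat.lt_succ_self L),
        ih num num' (fun k hk => h k (Nat.lt_succ_of_lt hk))]

lemma pvAInner_low (row_list : List Int) (L num : Nat) (h : num < 2 ^ L) :
    pvAInner row_list (L + 1) num = pvAInner row_list L num := by
  rw [pvAInner_succ, Nat.testBit_eq_false_of_lt h, if_neg (by simp)]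

lemma pvAInner_high (row_list : List Int) (L num : Nat) (h : num < 2 ^ L) :
    pvAInner row_list (L + 1) (2 ^ L + num)
      = pvAInner row_list L num ++ [pvX row_list L] := by
  rw [pvAInner_succ, Nat.testBit_two_pow_add_eq, Nat.testBit_eq_false_of_lt h]
  simp only [Bool.not_false, if_true]
  rw [pvAInner_congr row_list L (2 ^ L + num) num
      (fun k hk => Nat.testBit_two_pow_add_gt hk num)]

lemma pvMap_range (row_list : List Int) (L : Nat) :
    (List.range (2 ^ L)).map (pvAInner row_list L) = pvSubsets row_list L := by
  induction L with
  | zero => rfl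
  | succ L ih =>
      have hr : List.range (2 ^ (L + 1)) = List.range (2 ^ L) ++ (List.range (2 ^ L)).map (2 ^ L + ·) := by
        rw [pow_succ, Nat.mul_two, List.range_add]
      rw [hr, List.map_append, pvSubsets_succ, ← ih]
      congr 1
      · exact List.map_congr_left (fun n hn => pvAInner_low row_list L n (List.mem_range.mp hn))
      · rw [List.map_map, List.map_map]
        exact List.map_congr_left (fun n hn => pvAInner_high row_list L n (List.mem_range.mp hn))

lemma pvA_eq (row_list : List Int) (length max_amount : Int) :
    maximum_price row_list length max_amount
      = ((List.range (2 ^ length.toNat)).map (pvAInner row_list length.toNat)).filter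
          (fun s => decide (s.sum ≤ max_amount)) := by
  unfold maximum_price
  dsimp only
  have h := PySem.List.foldl_append_if (acc := ([] : List (List Int)))
      (p := fun num => decide ((pvAInner row_list length.toNat num).sum ≤ max_amount))
      (f := pvAInner row_list length.toNat)
      (l := List.range (2 ^ length.toNat))
  simp only [decide_eq_true_eq, List.nil_append] at h
  rw [h, List.filter_map]
  rfl

-- ===== VERDICT (by name: the statement is the Claim_ definition above) =====
theorem maximum_price_spec : Claim_equal_maximum_price := by
  intro row_list length max_amount _ _
  unfold Spec_maximum_price
  rw [pvA_eq, pvMap_range, pvAlt_eq]
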